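-- pv_equiv track=rewrite | github.com/LivNLP/ODP-tagger | data_prep.py | create_dict_of_training_instances
-- ===== SOURCE A (Python) =====
-- def create_dict_of_training_instances(list_items):
--     y, t, k = '', 0, {}
--     for i in list_items:
--         if i != '\n':
--             y += i
--             y += ' '
--         else:
--             if y:
--                 k[t] = y.strip()
--                 t += 1
--             y = ''
--     return k
-- ===== SOURCE B (Python) =====
-- def create_dict_of_training_instances(list_items):
--     results = []
--     rest = list_items
--     while '\n' in rest:
--         i = rest.index('\n')
--         seg = rest[:i]
--         if seg:
--             results.append(' '.join(seg).strip())
--         rest = rest[i + 1:]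
--     return dict(enumerate(results))
-- ===== Notes on version B (the rewrite author's own statement) =====
-- stated objective: alternative
-- what changed: Replaces A's character-by-character running-string accumulator (flushed on each newline) by a search-and-slice loop: repeatedly find the first '\n', slice the run of tokens out, join it once with ' '.join and strip, then enumerate the collected runs into the dict.
import Mathlib
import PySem

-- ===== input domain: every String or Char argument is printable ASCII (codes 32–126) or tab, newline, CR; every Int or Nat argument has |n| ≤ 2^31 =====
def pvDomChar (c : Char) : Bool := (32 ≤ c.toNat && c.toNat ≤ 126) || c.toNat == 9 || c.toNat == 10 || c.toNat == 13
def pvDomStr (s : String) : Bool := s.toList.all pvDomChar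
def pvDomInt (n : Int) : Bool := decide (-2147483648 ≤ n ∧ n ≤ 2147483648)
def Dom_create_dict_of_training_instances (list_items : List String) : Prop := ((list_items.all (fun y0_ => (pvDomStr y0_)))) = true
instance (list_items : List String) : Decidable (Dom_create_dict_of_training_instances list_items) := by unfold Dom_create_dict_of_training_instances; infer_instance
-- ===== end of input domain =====

-- B replaces A's flush-on-newline accumulator loop by repeated first-newline search with
-- slicing plus one final ' '.join per run (objective: alternative decomposition, same behaviour).

-- ===== PORT A =====
-- A's loop state: running character string y, next key t, dict k (values joined with trailing spaces, stripped at flush)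
def pvALoop : List String → List Char → Int → PySem.Dict Int String → PySem.Dict Int String
  | [], _, _, k => k
  | i :: rest, y, t, k =>
    if i ≠ "\n" then
      pvALoop rest (y ++ i.toList ++ [' ']) t k
    else
      if y ≠ [] then
        pvALoop rest [] (t + 1) (k.insert t (String.ofList (PySem.Chars.strip y)))
      else
        pvALoop rest [] t k

def create_dict_of_training_instances (list_items : List String) : List (Int × String) :=
  (pvALoop list_items [] 0 PySem.Dict.empty).items

-- ===== PORT B =====
-- while '\n' in rest: i = rest.index('\n'); seg = rest[:i]; flush seg; rest = rest[i+1:]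
def pvBLoop (rest results : List String) : List String :=
  if h : "\n" ∈ rest then
    let i : Nat := (PySem.List.index? rest "\n").getD 0
    let seg := PySem.List.slice rest none (some (i : Int))
    let results' := if seg ≠ [] then results ++ [PySem.Str.strip (PySem.Str.join " " seg)] else results
    pvBLoop (PySem.List.slice rest (some ((i : Int) + 1)) none) results'
  else results
termination_by rest.length
decreasing_by
  have hlen : 0 < rest.length := List.length_pos_iff.mpr (List.ne_nil_of_mem h)
  have hcast : (i : Int) + 1 = ((i + 1 : Nat) : Int) := by push_cast; ring
  rw [hcast, PySem.List.slice_from_natCast]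
  simp only [List.length_drop]
  omega

-- dict(enumerate(results)) under the association-list convention (keys are distinct, in order)
def create_dict_of_training_instances_alt (list_items : List String) : List (Int × String) :=
  PySem.List.enumerate (pvBLoop list_items []) 0

-- ===== PRECONDITION & SPEC =====
def Spec_create_dict_of_training_instances (list_items : List String) (out : List (Int × String)) : Prop := out = create_dict_of_training_instances_alt list_items
instance (list_items : List String) (out : List (Int × String)) : Decidable (Spec_create_dict_of_training_instances list_items out) := by unfold Spec_create_dict_of_training_instances; infer_instance

-- ===== CLAIM (what is proved, stated in full; the proofs are below) =====
def Claim_equal_create_dict_of_training_instances : Prop := ∀ (list_items : List String), Dom_create_dict_of_training_instances list_items → Spec_create_dict_of_training_instances list_items (create_dict_of_training_instances list_items)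

-- ===== LEMMAS AND PROOFS =====

-- A's running string y, reconstructed from the tokens accumulated since the last newline
def pvJoinSp (acc : List String) : List Char :=
  acc.foldl (fun y i => y ++ i.toList ++ [' ']) []

-- the flushed value of a run
def pvFl (acc : List String) : String :=
  String.ofList (PySem.Chars.strip (pvJoinSp acc))

-- the list of flushed runs (common characterisation of both loops)
def pvSegs : List String → List String → List String
  | [], _ => []
  | x :: xs, acc =>
    if x = "\n" then
      (if acc = [] then pvSegs xs [] else pvFl acc :: pvSegs xs [])
    else pvSegs xs (acc ++ [x])

theorem pvJoinSp_hoist (acc : List String) (y : List Char) :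
    acc.foldl (fun y i => y ++ i.toList ++ [' ']) y = y ++ pvJoinSp acc := by
  induction acc generalizing y with
  | nil => simp [pvJoinSp]
  | cons a rest ih =>
    simp only [pvJoinSp, List.foldl_cons] at *
    rw [ih, ih (([] : List Char) ++ a.toList ++ [' '])]
    simp

theorem pvJoinSp_append (acc : List String) (x : String) :
    pvJoinSp (acc ++ [x]) = pvJoinSp acc ++ x.toList ++ [' '] := by
  simp [pvJoinSp, List.foldl_append, pvJoinSp_hoist]

theorem pvJoinSp_cons (a : String) (rest : List String) :
    pvJoinSp (a :: rest) = (a.toList ++ [' ']) ++ pvJoinSp rest := by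
  show List.foldl (fun y i => y ++ i.toList ++ [' ']) (([] : List Char) ++ a.toList ++ [' ']) rest
    = (a.toList ++ [' ']) ++ pvJoinSp rest
  rw [pvJoinSp_hoist]
  simp

theorem pvJoinSp_eq_nil_iff (acc : List String) : pvJoinSp acc = [] ↔ acc = [] := by
  cases acc with
  | nil => simp [pvJoinSp]
  | cons a rest => rw [pvJoinSp_cons]; simp

theorem pvALoop_items (xs : List String) (acc : List String) (t : Int)
    (k : PySem.Dict Int String) (hk : ∀ p ∈ k.items, p.1 < t) :
    (pvALoop xs (pvJoinSp acc) t k).items = k.items ++ PySem.List.enumerate (pvSegs xs acc) t := by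
  induction xs generalizing acc t k with
  | nil => simp [pvALoop, pvSegs]
  | cons x xs ih =>
    by_cases hx : x = "\n"
    · subst hx
      by_cases hacc : acc = []
      · subst hacc
        have h0 : pvJoinSp ([] : List String) = [] := rfl
        simp only [pvALoop]
        rw [if_neg (fun hh : ("\n" : String) ≠ "\n" => hh rfl),
          if_neg (fun hh : pvJoinSp ([] : List String) ≠ [] => hh h0)]
        have := ih [] t k hk
        rw [h0] at this
        rw [this, show pvSegs ("\n" :: xs) [] = pvSegs xs [] from by simp [pvSegs]]
      · have hy : pvJoinSp acc ≠ [] := fun h => hacc ((pvJoinSp_eq_nil_iff acc).mp h)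
        have hnc : k.contains t = false := by
          by_contra hcon
          have hct : k.contains t = true := by
            cases hcontains : k.contains t
            · exact absurd hcontains hcon
            · rfl
          obtain ⟨p, hp, hpt⟩ : ∃ p ∈ k.items, p.1 = t := by
            have := (PySem.Dict.contains_iff_mem_keys k t).mp hct
            simp only [PySem.Dict.keys, List.mem_map] at this
            obtain ⟨p, hp, hpt⟩ := this
            exact ⟨p, hp, hpt⟩
          exact absurd (hpt ▸ hk p hp) (lt_irrefl t)
        have hins := PySem.Dict.items_insert_of_not_contains k
          (String.ofList (PySem.Chars.strip (pvJoinSp acc))) hnc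
        have hk' : ∀ p ∈ (k.insert t (String.ofList (PySem.Chars.strip (pvJoinSp acc)))).items,
            p.1 < t + 1 := by
          intro p hp
          rw [hins, List.mem_append] at hp
          rcases hp with hp | hp
          · exact lt_trans (hk p hp) (lt_add_one t)
          · have : p = (t, String.ofList (PySem.Chars.strip (pvJoinSp acc))) := by
              simpa using hp
            rw [this]; exact lt_add_one t
        have h0 : pvJoinSp ([] : List String) = [] := rfl
        simp only [pvALoop]
        rw [if_neg (fun hh : ("\n" : String) ≠ "\n" => hh rfl), if_pos hy]
        have := ih [] (t + 1)
          (k.insert t (String.ofList (PySem.Chars.strip (pvJoinSp acc)))) hk'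
        rw [h0] at this
        rw [this, hins]
        simp only [pvSegs, if_pos rfl, if_neg hacc, PySem.List.enumerate_cons, pvFl]
        simp
    · simp only [pvALoop, if_pos hx, pvSegs, if_neg hx]
      rw [← pvJoinSp_append]
      exact ih (acc ++ [x]) t k hk

theorem pvSegs_no_nl (xs : List String) (acc : List String) (h : "\n" ∉ xs) :
    pvSegs xs acc = [] := by
  induction xs generalizing acc with
  | nil => simp [pvSegs]
  | cons x xs ih =>
    have hx : x ≠ "\n" := fun hx => h (hx ▸ List.mem_cons_self)
    have hxs : "\n" ∉ xs := fun hm => h (List.mem_cons_of_mem _ hm)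
    simp only [pvSegs, if_neg hx]
    exact ih _ hxs

theorem pvSegs_split (pre suf : List String) (acc : List String) (h : "\n" ∉ pre) :
    pvSegs (pre ++ "\n" :: suf) acc =
      (if acc ++ pre = [] then [] else [pvFl (acc ++ pre)]) ++ pvSegs suf [] := by
  induction pre generalizing acc with
  | nil => by_cases hacc : acc = [] <;> simp [pvSegs, hacc]
  | cons p ps ih =>
    have hp : p ≠ "\n" := fun hp => h (hp ▸ List.mem_cons_self)
    have hps : "\n" ∉ ps := fun hm => h (List.mem_cons_of_mem _ hm)
    simp only [List.cons_append, pvSegs, if_neg hp]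
    rw [ih (acc ++ [p]) hps]
    simp

theorem pvStrip_append_space (s : List Char) :
    PySem.Chars.strip (s ++ [' ']) = PySem.Chars.strip s := by
  have hrs : ∀ t : List Char, PySem.Chars.rstrip (t ++ [' ']) = PySem.Chars.rstrip t := by
    intro t
    simp [PySem.Chars.rstrip, List.reverse_append, List.dropWhile_cons,
      show PySem.Chars.isspace ' ' = true from rfl]
  simp only [PySem.Chars.strip, PySem.Chars.lstrip, List.dropWhile_append]
  split_ifs with hemp
  · have : List.dropWhile PySem.Chars.isspace s = [] := by
      simpa [List.isEmpty_iff] using hemp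
    simp [this, PySem.Chars.rstrip, List.dropWhile_cons,
      show PySem.Chars.isspace ' ' = true from rfl]
  · exact hrs _

theorem pvJoinSp_eq_join (seg : List String) (h : seg ≠ []) :
    pvJoinSp seg = PySem.Chars.join [' '] (seg.map String.toList) ++ [' '] := by
  induction seg with
  | nil => exact absurd rfl h
  | cons a rest ih =>
    cases rest with
    | nil =>
      simp [pvJoinSp, PySem.Chars.join_singleton]
    | cons b r =>
      rw [pvJoinSp_cons, ih (by simp)]
      simp only [List.map_cons]
      rw [PySem.Chars.join_cons_cons]
      simp

theorem pvFl_eq_strip_join (seg : List String) (h : seg ≠ []) :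
    PySem.Str.strip (PySem.Str.join " " seg) = pvFl seg := by
  have h1 : (PySem.Str.join " " seg).toList =
      PySem.Chars.join [' '] (seg.map String.toList) := by
    rw [PySem.Str.toList_join]; rfl
  have : PySem.Chars.strip ((PySem.Str.join " " seg).toList) =
      PySem.Chars.strip (pvJoinSp seg) := by
    rw [h1, pvJoinSp_eq_join seg h, pvStrip_append_space]
  calc PySem.Str.strip (PySem.Str.join " " seg)
      = String.ofList (PySem.Chars.strip ((PySem.Str.join " " seg).toList)) := rfl
    _ = String.ofList (PySem.Chars.strip (pvJoinSp seg)) := by rw [this]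
    _ = pvFl seg := rfl

theorem pvBLoop_eq_aux (n : Nat) (rest results : List String) (hn : rest.length ≤ n) :
    pvBLoop rest results = results ++ pvSegs rest [] := by
  induction n generalizing rest results with
  | zero =>
    have : rest = [] := List.length_eq_zero_iff.mp (Nat.le_zero.mp hn)
    subst this
    rw [pvBLoop]
    simp [pvSegs]
  | succ n ih =>
    rw [pvBLoop]
    by_cases h : "\n" ∈ rest
    · simp only [dif_pos h]
      obtain ⟨i, hi⟩ : ∃ i, PySem.List.index? rest "\n" = some i := by
        have := (PySem.List.index?_isSome_iff rest "\n").mpr h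
        exact Option.isSome_iff_exists.mp this
      obtain ⟨pre, suf, hsplit, hlen, hpre⟩ :=
        (PySem.List.index?_eq_some_iff rest "\n" i).mp hi
      have hgetd : (PySem.List.index? rest "\n").getD 0 = i := by rw [hi]; rfl
      have hseg : PySem.List.slice rest none (some ((i : Nat) : Int)) = pre := by
        rw [PySem.List.slice_to_natCast, hsplit, ← hlen, List.take_left]
      have hdrop : PySem.List.slice rest (some (((i : Nat) : Int) + 1)) none = suf := by
        have hcast : ((i : Nat) : Int) + 1 = ((i + 1 : Nat) : Int) := by push_cast; ring
        rw [hcast, PySem.List.slice_from_natCast, hsplit]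
        have : i + 1 = (pre ++ ["\n"]).length := by simp [hlen]
        rw [this, show pre ++ "\n" :: suf = (pre ++ ["\n"]) ++ suf by simp, List.drop_left]
      have hsuf : suf.length ≤ n := by
        have : rest.length = pre.length + 1 + suf.length := by simp [hsplit]; omega
        omega
      rw [hgetd, hseg, hdrop, ih suf _ hsuf, hsplit, pvSegs_split pre suf [] hpre]
      by_cases hp : pre = []
      · subst hp; simp
      · rw [if_pos hp, pvFl_eq_strip_join pre hp]
        simp [hp]
    · simp only [dif_neg h]
      rw [pvSegs_no_nl rest [] h]
      simp

-- ===== VERDICT (by name: the statement is the Claim_ definition above) =====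
theorem create_dict_of_training_instances_spec : Claim_equal_create_dict_of_training_instances := by
  intro list_items _
  unfold Spec_create_dict_of_training_instances
  unfold create_dict_of_training_instances create_dict_of_training_instances_alt
  have h0 : ([] : List Char) = pvJoinSp [] := rfl
  rw [h0, pvALoop_items list_items [] 0 PySem.Dict.empty (by simp [PySem.Dict.empty])]
  rw [pvBLoop_eq_aux list_items.length list_items [] le_rfl]
  simp [PySem.Dict.empty]
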